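-- pv_equiv track=rewrite | github.com/mmmatjaz/torch_sticker_classifier | test.py | matrix_to_dict
-- ===== SOURCE A (Python) =====
-- def matrix_to_dict(matrix):
--     redundant_map = {i: set() for i in range(len(matrix))}
--     # redundant map of all direct connections
--     possible_to_add = set()
--     for i in range(len(matrix)):
--         for j in range(i+1, len(matrix)):
--             if matrix[i][j]:
--                 redundant_map[i].add(j)
--                 redundant_map[j].add(i)
--             else:
--                 possible_to_add.add((i, j))
--     return redundant_map, possible_to_add
-- ===== SOURCE B (Python) =====
-- def matrix_to_dict(matrix):
--     # B: edge-set-then-complement decomposition (alternative, same cost)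
--     n = len(matrix)
--     edges = [(i, j) for i in range(n) for j in range(i + 1, n) if matrix[i][j]]
--     redundant_map = {i: set() for i in range(n)}
--     for i, j in edges:
--         redundant_map[i].add(j)
--         redundant_map[j].add(i)
--     all_pairs = {(i, j) for i in range(n) for j in range(i + 1, n)}
--     possible_to_add = all_pairs - set(edges)
--     return redundant_map, possible_to_add
-- ===== Notes on version B (the rewrite author's own statement) =====
-- stated objective: alternative
-- what changed: B first materialises the upper-triangle edge list, builds the adjacency map by a single loop over that edge list, and obtains possible_to_add as the set difference all-pairs minus edges, instead of A's single interleaved if/else accumulation over every pair.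
import Mathlib
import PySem

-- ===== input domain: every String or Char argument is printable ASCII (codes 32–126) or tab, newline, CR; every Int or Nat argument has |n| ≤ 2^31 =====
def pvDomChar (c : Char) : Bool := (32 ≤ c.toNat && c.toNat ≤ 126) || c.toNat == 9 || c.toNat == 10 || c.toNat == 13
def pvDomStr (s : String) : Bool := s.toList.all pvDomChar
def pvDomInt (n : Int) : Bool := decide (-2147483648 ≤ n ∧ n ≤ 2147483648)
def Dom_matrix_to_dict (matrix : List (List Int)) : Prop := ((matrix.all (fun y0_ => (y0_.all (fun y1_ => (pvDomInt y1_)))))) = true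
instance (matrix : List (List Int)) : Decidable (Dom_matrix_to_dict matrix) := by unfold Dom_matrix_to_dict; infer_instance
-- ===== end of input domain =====

-- B builds the upper-triangle edge list first, derives the adjacency map from it and takes
-- possible_to_add as the all-pairs/edges set difference (alternative decomposition, same cost).

-- ===== PORT A =====
def matrix_to_dict (matrix : List (List Int)) : (List (Int × List Int)) × (List (Int × Int)) :=
  let n : Int := matrix.length
  let rm0 : PySem.Dict Int (PySem.Set Int) :=
    (PySem.List.pyRange 0 n 1).foldl (fun d i => d.insert i PySem.Set.empty) PySem.Dict.empty
  let st :=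
    (PySem.List.pyRange 0 n 1).foldl (fun s i =>
      (PySem.List.pyRange (i + 1) n 1).foldl (fun s j =>
        if PySem.List.pyGetD (PySem.List.pyGetD matrix i []) j 0 != 0 then
          ((s.1.modify i PySem.Set.empty (fun t => PySem.Set.add t j)).modify j
              PySem.Set.empty (fun t => PySem.Set.add t i), s.2)
        else
          (s.1, PySem.Set.add s.2 (i, j))) s)
      (rm0, (PySem.Set.empty : PySem.Set (Int × Int)))
  (st.1.items, st.2)

-- ===== PORT B =====
def matrix_to_dict_alt (matrix : List (List Int)) : (List (Int × List Int)) × (List (Int × Int)) :=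
  let n : Int := matrix.length
  let edges : List (Int × Int) :=
    (PySem.List.pyRange 0 n 1).flatMap (fun i =>
      ((PySem.List.pyRange (i + 1) n 1).filter
          (fun j => PySem.List.pyGetD (PySem.List.pyGetD matrix i []) j 0 != 0)).map
        (fun j => (i, j)))
  let rm0 : PySem.Dict Int (PySem.Set Int) :=
    (PySem.List.pyRange 0 n 1).foldl (fun d i => d.insert i PySem.Set.empty) PySem.Dict.empty
  let rm := edges.foldl (fun d p =>
      (d.modify p.1 PySem.Set.empty (fun t => PySem.Set.add t p.2)).modify p.2
        PySem.Set.empty (fun t => PySem.Set.add t p.1)) rm0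
  let allPairs : PySem.Set (Int × Int) :=
    PySem.Set.ofList ((PySem.List.pyRange 0 n 1).flatMap (fun i =>
      (PySem.List.pyRange (i + 1) n 1).map (fun j => (i, j))))
  let possible := PySem.Set.diff allPairs (PySem.Set.ofList edges)
  (rm.items, possible)

-- ===== PRECONDITION & SPEC =====
-- Pre_ excludes exactly the inputs on which A raises IndexError: some row other than the
-- last is shorter than the number of rows, so matrix[i][j] is read out of range.
def Pre_matrix_to_dict (matrix : List (List Int)) : Prop :=
  ∀ r ∈ matrix.dropLast, matrix.length ≤ r.length
instance (matrix : List (List Int)) : Decidable (Pre_matrix_to_dict matrix) := by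
  unfold Pre_matrix_to_dict; infer_instance
def pvWitness_matrix_to_dict : List (List Int) := [[0, 1], [0, 0]]

def Spec_matrix_to_dict (matrix : List (List Int)) (out : (List (Int × List Int)) × (List (Int × Int))) : Prop := out = matrix_to_dict_alt matrix
instance (matrix : List (List Int)) (out : (List (Int × List Int)) × (List (Int × Int))) : Decidable (Spec_matrix_to_dict matrix out) := by unfold Spec_matrix_to_dict; infer_instance

-- ===== CLAIM (what is proved, stated in full; the proofs are below) =====
def Claim_equal_matrix_to_dict : Prop := ∀ (matrix : List (List Int)), Dom_matrix_to_dict matrix → Pre_matrix_to_dict matrix → Spec_matrix_to_dict matrix (matrix_to_dict matrix)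

-- ===== LEMMAS AND PROOFS =====

-- the lexicographic list of all upper-triangle index pairs
def pvPairs (n : Int) : List (Int × Int) :=
  (PySem.List.pyRange 0 n 1).flatMap (fun i =>
    (PySem.List.pyRange (i + 1) n 1).map (fun j => (i, j)))

-- the truthiness test A and B both apply to a pair
def pvEdge (matrix : List (List Int)) (p : Int × Int) : Bool :=
  PySem.List.pyGetD (PySem.List.pyGetD matrix p.1 []) p.2 0 != 0

lemma pvPairs_nodup (n : Int) : (pvPairs n).Nodup := by
  unfold pvPairs
  rw [List.nodup_flatMap]
  constructor
  · intro i _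
    exact (PySem.List.nodup_pyRange_one _ _).map (fun a b h => by
      simpa using congrArg Prod.snd h)
  · refine (PySem.List.nodup_pyRange_one _ _).imp ?_
    intro a b hab
    rw [Function.onFun, List.disjoint_left]
    rintro x hxa hxb
    obtain ⟨j, _, rfl⟩ := List.mem_map.1 hxa
    obtain ⟨j', _, h⟩ := List.mem_map.1 hxb
    exact hab (by simpa using congrArg Prod.fst h.symm)

-- A's interleaved accumulation over a pair list splits into the edge fold and the non-edge fold
lemma pvSplit {α : Type} (L : List (Int × Int)) (P : Int × Int → Bool)
    (F : PySem.Dict Int α → Int × Int → PySem.Dict Int α)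
    (d : PySem.Dict Int α) (acc : PySem.Set (Int × Int)) :
    L.foldl (fun s p => if P p then (F s.1 p, s.2) else (s.1, PySem.Set.add s.2 p)) (d, acc)
      = ((L.filter P).foldl F d,
         (L.filter (fun p => !P p)).foldl PySem.Set.add acc) := by
  induction L generalizing d acc with
  | nil => rfl
  | cons p L ih =>
    by_cases h : P p = true
    · simp [h, ih]
    · simp [h] at *
      simp [ih]

theorem matrix_to_dict_spec : Claim_equal_matrix_to_dict := by
  intro matrix _ _
  unfold Spec_matrix_to_dict
  simp only [matrix_to_dict, matrix_to_dict_alt]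
  set n : Int := (matrix.length : Int) with hn
  -- rewrite A's nested loop as a single fold over pvPairs n
  have hA : ∀ (init : PySem.Dict Int (PySem.Set Int) × PySem.Set (Int × Int)),
      (PySem.List.pyRange 0 n 1).foldl (fun s i =>
        (PySem.List.pyRange (i + 1) n 1).foldl (fun s j =>
          if PySem.List.pyGetD (PySem.List.pyGetD matrix i []) j 0 != 0 then
            ((s.1.modify i PySem.Set.empty (fun t => PySem.Set.add t j)).modify j
                PySem.Set.empty (fun t => PySem.Set.add t i), s.2)
          else
            (s.1, PySem.Set.add s.2 (i, j))) s) init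
      = (pvPairs n).foldl (fun s p =>
          if pvEdge matrix p then
            ((s.1.modify p.1 PySem.Set.empty (fun t => PySem.Set.add t p.2)).modify p.2
                PySem.Set.empty (fun t => PySem.Set.add t p.1), s.2)
          else
            (s.1, PySem.Set.add s.2 p)) init := by
    intro init
    unfold pvPairs
    rw [List.foldl_flatMap]
    refine PySem.List.foldl_congr_mem _ _ _ _ ?_
    intro s i _
    rw [List.foldl_map]
    rfl
  rw [hA, pvSplit (pvPairs n) (pvEdge matrix)
    (fun d p => (d.modify p.1 PySem.Set.empty fun t => t.add p.2).modify p.2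
      PySem.Set.empty fun t => t.add p.1)]
  -- edges of B are the filtered pair list
  have hE : ((PySem.List.pyRange 0 n 1).flatMap (fun i =>
      ((PySem.List.pyRange (i + 1) n 1).filter
          (fun j => PySem.List.pyGetD (PySem.List.pyGetD matrix i []) j 0 != 0)).map
        (fun j => (i, j))))
      = (pvPairs n).filter (pvEdge matrix) := by
    unfold pvPairs
    rw [List.filter_flatMap]
    refine List.flatMap_congr ?_
    intro i _
    rw [List.filter_map]
    rfl
  rw [hE]
  refine Prod.ext rfl ?_
  -- second components: the non-edge fold equals the set difference
  show (((pvPairs n).filter (fun p => !pvEdge matrix p)).foldl PySem.Set.add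
          PySem.Set.empty : PySem.Set (Int × Int))
      = PySem.Set.diff (PySem.Set.ofList (pvPairs n))
          (PySem.Set.ofList ((pvPairs n).filter (pvEdge matrix)))
  have hnd := pvPairs_nodup n
  rw [show (((pvPairs n).filter (fun p => !pvEdge matrix p)).foldl PySem.Set.add
          PySem.Set.empty : PySem.Set (Int × Int))
        = PySem.Set.ofList ((pvPairs n).filter (fun p => !pvEdge matrix p)) from rfl,
      PySem.Set.ofList_eq_self_of_nodup _ (hnd.filter (fun p => !pvEdge matrix p)),
      PySem.Set.ofList_eq_self_of_nodup _ (hnd.filter (pvEdge matrix)),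
      show PySem.Set.diff (PySem.Set.ofList (pvPairs n))
          ((pvPairs n).filter (pvEdge matrix))
        = ((PySem.Set.ofList (pvPairs n)).filter
            (fun x => !PySem.Set.contains ((pvPairs n).filter (pvEdge matrix)) x)) from rfl,
      PySem.Set.ofList_eq_self_of_nodup _ hnd]
  refine (List.filter_congr ?_).symm
  intro x hx
  rcases h : pvEdge matrix x with _ | _
  · simp [h]
  · simp [h, hx]
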